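-- pv_equiv track=rewrite | github.com/pypi-data/pypi-mirror-386 | packages/lbplatformutils/lbplatformutils-4.5.1.tar.gz/lbplatformutils-4.5.1/LbPlatformUtils/inspect.py | parse_os_release
-- ===== SOURCE A (Python) =====
-- def parse_os_release(file_obj):
--     """
--     Extract OS id from content of /etc/os-release.
--
--     See https://www.freedesktop.org/software/systemd/man/os-release.html
--     """
--     if hasattr(file_obj, "readlines"):
--         file_obj = file_obj.readlines()
--     release = dict(
--         stripped.split("=", 1)
--         for line in file_obj
--         for stripped in (line.strip(),)
--         if "=" in stripped
--     )
--
--     for key in release:  # values might be surrounded by quotes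
--         release[key] = release[key].strip('"').strip("'")
--
--     name = release.get("ID", "linux").split("-", 1)[0]
--     compatible = name + release.get("ID_LIKE", "")
--     if "rhel" in compatible or "suse" in compatible:
--         version = release.get("VERSION_ID", "").split(".", 1)[0]
--     else:
--         version = release.get(
--             "VERSION_ID", "testing" if name == "debian" else ""
--         ).replace(".", "")
--     if name == "scientific":
--         name = "sl"  # that's the traditional name of
--
--     return name, version
-- ===== SOURCE B (Python) =====
-- def parse_os_release(file_obj):
--     """
--     Extract OS id from content of /etc/os-release.
--
--     See https://www.freedesktop.org/software/systemd/man/os-release.html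
--     """
--     if hasattr(file_obj, "readlines"):
--         file_obj = file_obj.readlines()
--     # Scan the lines back to front, keeping only the three fields we need
--     # (first match wins, i.e. the last occurrence in the file), and stop as
--     # soon as all three are known.  No dict of all lines is ever built.
--     os_id = id_like = version_id = None
--     for line in reversed(list(file_obj)):
--         if os_id is not None and id_like is not None and version_id is not None:
--             break
--         stripped = line.strip()
--         if "=" not in stripped:
--             continue
--         key, value = stripped.split("=", 1)
--         value = value.strip('"').strip("'")
--         if key == "ID" and os_id is None:
--             os_id = value
--         elif key == "ID_LIKE" and id_like is None:
--             id_like = value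
--         elif key == "VERSION_ID" and version_id is None:
--             version_id = value
--     name = ("linux" if os_id is None else os_id).split("-", 1)[0]
--     compatible = name + ("" if id_like is None else id_like)
--     if "rhel" in compatible or "suse" in compatible:
--         version = ("" if version_id is None else version_id).split(".", 1)[0]
--     else:
--         default = "testing" if name == "debian" else ""
--         version = (default if version_id is None else version_id).replace(".", "")
--     if name == "scientific":
--         name = "sl"
--     return name, version
-- ===== Notes on version B (the rewrite author's own statement) =====
-- stated objective: alternative
-- what changed: A builds a dict of every KEY=VALUE line and then quote-strips all its values; B scans the lines back to front keeping only the three needed fields (first match wins = A's last-occurrence dict semantics) and stops early once all three are found, never building a dict.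
import Mathlib
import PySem

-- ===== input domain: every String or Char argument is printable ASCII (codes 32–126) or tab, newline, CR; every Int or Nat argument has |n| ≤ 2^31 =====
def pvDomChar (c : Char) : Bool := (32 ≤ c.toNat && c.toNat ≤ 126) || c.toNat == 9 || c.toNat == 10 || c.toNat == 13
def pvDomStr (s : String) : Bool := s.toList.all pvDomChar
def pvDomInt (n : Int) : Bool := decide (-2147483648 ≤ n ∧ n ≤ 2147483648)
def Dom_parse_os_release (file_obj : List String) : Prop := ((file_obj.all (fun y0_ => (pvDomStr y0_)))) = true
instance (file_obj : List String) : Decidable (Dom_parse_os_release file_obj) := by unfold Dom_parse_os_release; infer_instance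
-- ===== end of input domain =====

-- B replaces A's dict of all lines by a back-to-front scan keeping only the three
-- needed fields (first match wins, early exit); objective: alternative decomposition.

-- value.strip('"').strip("'")  (both Pythons contain this exact expression)
def pvStripQuotes (v : String) : String :=
  PySem.Str.stripChars (PySem.Str.stripChars v "\"") "'"

-- ===== PORT A =====
-- one step of A's dict comprehension: strip the line, skip it without '=', insert split("=",1)
def pvABuildStep (d : PySem.Dict String String) (line : String) : PySem.Dict String String :=
  if PySem.Str.isIn "=" (PySem.Str.strip line) then
    match PySem.Str.splitMax? (PySem.Str.strip line) "=" 1 with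
    | some [k, v] => d.insert k v
    | _ => d
  else d

def parse_os_release (file_obj : List String) : String × String :=
  let release := file_obj.foldl pvABuildStep PySem.Dict.empty
  -- for key in release: release[key] = release[key].strip('"').strip("'")
  let release := release.keys.foldl
    (fun d k => d.insert k (pvStripQuotes (d.getD k ""))) release
  let name := ((PySem.Str.splitMax? (release.getD "ID" "linux") "-" 1).getD []).headD ""
  let compatible := name ++ release.getD "ID_LIKE" ""
  let version :=
    if PySem.Str.isIn "rhel" compatible || PySem.Str.isIn "suse" compatible then
      ((PySem.Str.splitMax? (release.getD "VERSION_ID" "") "." 1).getD []).headD ""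
    else
      PySem.Str.replace (release.getD "VERSION_ID"
        (if name == "debian" then "testing" else "")) "." ""
  let name := if name == "scientific" then "sl" else name
  (name, version)

-- ===== PORT B =====
-- B's loop over reversed(file_obj): three Option accumulators, first match wins, break when all known
set_option maxHeartbeats 2000000 in
def pvBLoop : List String → Option String × Option String × Option String →
    Option String × Option String × Option String
  | [], acc => acc
  | line :: rest, (i, il, vi) =>
    if i.isSome && il.isSome && vi.isSome then (i, il, vi)
    else
      if PySem.Str.isIn "=" (PySem.Str.strip line) then
        match PySem.Str.splitMax? (PySem.Str.strip line) "=" 1 with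
        | some [k, v] =>
          let v := pvStripQuotes v
          if k == "ID" && i.isNone then pvBLoop rest (some v, il, vi)
          else if k == "ID_LIKE" && il.isNone then pvBLoop rest (i, some v, vi)
          else if k == "VERSION_ID" && vi.isNone then pvBLoop rest (i, il, some v)
          else pvBLoop rest (i, il, vi)
        | _ => pvBLoop rest (i, il, vi)
      else pvBLoop rest (i, il, vi)

def parse_os_release_alt (file_obj : List String) : String × String :=
  let (i, il, vi) := pvBLoop file_obj.reverse (none, none, none)
  let name := ((PySem.Str.splitMax? (i.getD "linux") "-" 1).getD []).headD ""
  let compatible := name ++ il.getD ""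
  let version :=
    if PySem.Str.isIn "rhel" compatible || PySem.Str.isIn "suse" compatible then
      ((PySem.Str.splitMax? (vi.getD "") "." 1).getD []).headD ""
    else
      PySem.Str.replace (vi.getD (if name == "debian" then "testing" else "")) "." ""
  let name := if name == "scientific" then "sl" else name
  (name, version)

-- ===== PRECONDITION & SPEC =====
def Spec_parse_os_release (file_obj : List String) (out : String × String) : Prop := out = parse_os_release_alt file_obj
instance (file_obj : List String) (out : String × String) : Decidable (Spec_parse_os_release file_obj out) := by unfold Spec_parse_os_release; infer_instance

-- ===== CLAIM (what is proved, stated in full; the proofs are below) =====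
def Claim_equal_parse_os_release : Prop := ∀ (file_obj : List String), Dom_parse_os_release file_obj → Spec_parse_os_release file_obj (parse_os_release file_obj)

-- ===== LEMMAS AND PROOFS =====

-- (key, raw value) of a line, as A's comprehension sees it (none = line skipped)
def pvKeyVal (line : String) : Option (String × String) :=
  if PySem.Str.isIn "=" (PySem.Str.strip line) then
    match PySem.Str.splitMax? (PySem.Str.strip line) "=" 1 with
    | some [k, v] => some (k, v)
    | _ => none
  else none

-- the raw value the line binds to key j, if any
def pvHit (j : String) (line : String) : Option String :=
  match pvKeyVal line with
  | some (k, v) => if k = j then some v else none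
  | none => none

-- raw value of the LAST line binding j
def pvLastVal (j : String) : List String → Option String
  | [] => none
  | l :: rest => (pvLastVal j rest).or (pvHit j l)

-- stripped value of the FIRST line binding j (B scans the reversed list)
def pvFirstVal (j : String) : List String → Option String
  | [] => none
  | l :: rest => ((pvHit j l).map pvStripQuotes).or (pvFirstVal j rest)

theorem pvABuildStep_eq (d : PySem.Dict String String) (line : String) :
    pvABuildStep d line = match pvKeyVal line with
      | some (k, v) => d.insert k v
      | none => d := by
  unfold pvABuildStep pvKeyVal
  by_cases h : PySem.Str.isIn "=" (PySem.Str.strip line) = true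
  · simp only [h, if_true]
    cases hs : PySem.Str.splitMax? (PySem.Str.strip line) "=" 1 with
    | none => rfl
    | some l => rcases l with _ | ⟨k, _ | ⟨v, _ | ⟨x, xs⟩⟩⟩ <;> rfl
  · simp only [h]; rfl

theorem pvBuild_nodup (ls : List String) (d : PySem.Dict String String)
    (h : d.keys.Nodup) : (ls.foldl pvABuildStep d).keys.Nodup := by
  induction ls generalizing d with
  | nil => exact h
  | cons l rest ih =>
    simp only [List.foldl_cons]
    apply ih
    rw [pvABuildStep_eq]
    cases pvKeyVal l with
    | none => exact h
    | some p => exact PySem.Dict.nodup_keys_insert _ _ _ h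

theorem pvBuild_get (ls : List String) (d : PySem.Dict String String) (j : String) :
    (ls.foldl pvABuildStep d).get? j = (pvLastVal j ls).or (d.get? j) := by
  induction ls generalizing d with
  | nil => simp [pvLastVal, Option.or]
  | cons l rest ih =>
    simp only [List.foldl_cons, pvLastVal]
    rw [ih, pvABuildStep_eq]
    cases hkv : pvKeyVal l with
    | none =>
      simp only [pvHit, hkv]
      cases pvLastVal j rest <;> rfl
    | some p =>
      obtain ⟨k, v⟩ := p
      rw [PySem.Dict.get?_insert]
      simp only [pvHit, hkv]
      by_cases hj : j = k
      · subst hj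
        cases pvLastVal j rest <;> simp [Option.or]
      · have : ¬ k = j := fun h => hj h.symm
        cases pvLastVal j rest <;> simp [Option.or, hj, this]

-- A's quote-stripping pass, seen through get?
theorem pvQuotePass_get (ks : List String) (d : PySem.Dict String String) (j : String)
    (hnd : ks.Nodup) (hc : ∀ k ∈ ks, d.contains k = true) :
    (ks.foldl (fun a k => a.insert k (pvStripQuotes (a.getD k ""))) d).get? j =
      if j ∈ ks then (d.get? j).map pvStripQuotes else d.get? j := by
  induction ks generalizing d with
  | nil => simp
  | cons k ks ih =>
    simp only [List.foldl_cons]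
    have hck : d.contains k = true := hc k (by simp)
    obtain ⟨v, hv⟩ : ∃ v, d.get? k = some v := by
      rw [PySem.Dict.contains_eq_isSome_get?] at hck
      exact Option.isSome_iff_exists.mp hck
    have hnd' : ks.Nodup := hnd.of_cons
    have hknot : k ∉ ks := by
      simp only [List.nodup_cons] at hnd; exact hnd.1
    have hc' : ∀ x ∈ ks, (d.insert k (pvStripQuotes (d.getD k ""))).contains x = true := by
      intro x hx
      rw [PySem.Dict.contains_insert]
      simp [hc x (List.mem_cons_of_mem _ hx)]
    rw [ih _ hnd' hc']
    by_cases hjk : j = k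
    · subst hjk
      simp only [if_neg hknot, List.mem_cons, true_or, if_pos]
      rw [PySem.Dict.get?_insert, if_pos rfl, hv,
        PySem.Dict.getD_eq_get?_getD, hv]
      rfl
    · rw [PySem.Dict.get?_insert, if_neg hjk]
      by_cases hjm : j ∈ ks <;> simp [hjm, hjk]

-- A's final lookup of field j with default dflt
theorem pvA_lookup (ls : List String) (j dflt : String) :
    (((ls.foldl pvABuildStep PySem.Dict.empty).keys.foldl
        (fun a k => a.insert k (pvStripQuotes (a.getD k ""))) (ls.foldl pvABuildStep PySem.Dict.empty)).getD j dflt) =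
      ((pvLastVal j ls).map pvStripQuotes).getD dflt := by
  set d := ls.foldl pvABuildStep PySem.Dict.empty with hd
  have hnd : d.keys.Nodup := pvBuild_nodup ls _ PySem.Dict.nodup_keys_empty
  have hget : d.get? j = pvLastVal j ls := by
    rw [hd, pvBuild_get]; cases pvLastVal j ls <;> simp [Option.or, PySem.Dict.get?_empty]
  have hc : ∀ k ∈ d.keys, d.contains k = true := by
    intro k hk; rw [PySem.Dict.contains_iff_mem_keys]; exact hk
  rw [PySem.Dict.getD_eq_get?_getD, pvQuotePass_get d.keys d j hnd hc]
  by_cases hm : j ∈ d.keys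
  · rw [if_pos hm, hget]
  · rw [if_neg hm]
    have : d.get? j = none := by
      rw [PySem.Dict.get?_eq_none_iff_not_mem_keys]; exact hm
    rw [this, hget.symm, this]
    rfl

-- B's loop computes, in each component, acc-or-first-match
theorem pvFV_cons_none (l : String) (rest : List String) (hkv : pvKeyVal l = none)
    (j : String) : pvFirstVal j (l :: rest) = pvFirstVal j rest := by
  show ((pvHit j l).map pvStripQuotes).or (pvFirstVal j rest) = _
  simp only [pvHit, hkv, Option.map_none, Option.none_or]

theorem pvFV_cons_some (l : String) (rest : List String) (k v : String)
    (hkv : pvKeyVal l = some (k, v)) (j : String) :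
    pvFirstVal j (l :: rest) =
      if k = j then (some (pvStripQuotes v)).or (pvFirstVal j rest)
      else pvFirstVal j rest := by
  show ((pvHit j l).map pvStripQuotes).or (pvFirstVal j rest) = _
  simp only [pvHit, hkv]
  by_cases h : k = j
  · simp only [if_pos h, Option.map_some]
  · simp only [if_neg h, Option.map_none, Option.none_or]

-- B's loop computes, in each component, acc-or-first-match
theorem pvBLoop_eq (rs : List String) (i il vi : Option String) :
    pvBLoop rs (i, il, vi) =
      (i.or (pvFirstVal "ID" rs), il.or (pvFirstVal "ID_LIKE" rs),
        vi.or (pvFirstVal "VERSION_ID" rs)) := by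
  induction rs generalizing i il vi with
  | nil => simp [pvBLoop, pvFirstVal, Option.or_none]
  | cons l rest ih =>
    rw [pvBLoop]
    by_cases hbrk : i.isSome && il.isSome && vi.isSome
    · rw [if_pos hbrk]
      simp only [Bool.and_eq_true, Option.isSome_iff_exists] at hbrk
      obtain ⟨⟨⟨a, ha⟩, ⟨b, hb⟩⟩, ⟨c, hc⟩⟩ := hbrk
      subst ha hb hc
      simp only [Option.some_or]
    · rw [if_neg hbrk]
      by_cases hin : PySem.Str.isIn "=" (PySem.Str.strip l) = true
      · rw [if_pos hin]
        cases hs : PySem.Str.splitMax? (PySem.Str.strip l) "=" 1 with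
        | none =>
          have hkv : pvKeyVal l = none := by unfold pvKeyVal; rw [if_pos hin, hs]
          rw [ih]; simp only [pvFV_cons_none l rest hkv]
        | some ws =>
          rcases ws with _ | ⟨k, _ | ⟨v, _ | ⟨x, xs⟩⟩⟩
          · have hkv : pvKeyVal l = none := by unfold pvKeyVal; rw [if_pos hin, hs]
            rw [ih]; simp only [pvFV_cons_none l rest hkv]
          · have hkv : pvKeyVal l = none := by unfold pvKeyVal; rw [if_pos hin, hs]
            rw [ih]; simp only [pvFV_cons_none l rest hkv]
          · have hkv : pvKeyVal l = some (k, v) := by unfold pvKeyVal; rw [if_pos hin, hs]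
            simp only [pvFV_cons_some l rest k v hkv]
            by_cases hk1 : k = "ID"
            · subst hk1
              have e2 : ¬ ("ID" = "ID_LIKE") := by decide
              have e3 : ¬ ("ID" = "VERSION_ID") := by decide
              rw [if_pos (rfl : "ID" = "ID"), if_neg e2, if_neg e3]
              cases i with
              | none =>
                rw [if_pos (by decide : ("ID" == "ID" && Option.isNone (none : Option String)) = true)]
                rw [ih]
                simp only [Option.none_or, Option.some_or]
              | some a =>
                rw [if_neg (by simp : ¬ ("ID" == "ID" && Option.isNone (some a)) = true)]
                rw [if_neg (by simp : ¬ ("ID" == "ID_LIKE" && Option.isNone il) = true)]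
                rw [if_neg (by simp : ¬ ("ID" == "VERSION_ID" && Option.isNone vi) = true)]
                rw [ih]
                simp only [Option.some_or]
            · by_cases hk2 : k = "ID_LIKE"
              · subst hk2
                have e1 : ¬ ("ID_LIKE" = "ID") := by decide
                have e3 : ¬ ("ID_LIKE" = "VERSION_ID") := by decide
                rw [if_neg e1, if_pos (rfl : "ID_LIKE" = "ID_LIKE"), if_neg e3]
                rw [if_neg (by simp : ¬ ("ID_LIKE" == "ID" && Option.isNone i) = true)]
                cases il with
                | none =>
                  rw [if_pos (by decide : ("ID_LIKE" == "ID_LIKE" && Option.isNone (none : Option String)) = true)]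
                  rw [ih]
                  simp only [Option.none_or, Option.some_or]
                | some b =>
                  rw [if_neg (by simp : ¬ ("ID_LIKE" == "ID_LIKE" && Option.isNone (some b)) = true)]
                  rw [if_neg (by simp : ¬ ("ID_LIKE" == "VERSION_ID" && Option.isNone vi) = true)]
                  rw [ih]
                  simp only [Option.some_or]
              · by_cases hk3 : k = "VERSION_ID"
                · subst hk3
                  have e1 : ¬ ("VERSION_ID" = "ID") := by decide
                  have e2 : ¬ ("VERSION_ID" = "ID_LIKE") := by decide
                  rw [if_neg e1, if_neg e2, if_pos (rfl : "VERSION_ID" = "VERSION_ID")]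
                  rw [if_neg (by simp : ¬ ("VERSION_ID" == "ID" && Option.isNone i) = true)]
                  rw [if_neg (by simp : ¬ ("VERSION_ID" == "ID_LIKE" && Option.isNone il) = true)]
                  cases vi with
                  | none =>
                    rw [if_pos (by decide : ("VERSION_ID" == "VERSION_ID" && Option.isNone (none : Option String)) = true)]
                    rw [ih]
                    simp only [Option.none_or, Option.some_or]
                  | some c =>
                    rw [if_neg (by simp : ¬ ("VERSION_ID" == "VERSION_ID" && Option.isNone (some c)) = true)]
                    rw [ih]
                    simp only [Option.some_or]
                · simp only [if_neg hk1, if_neg hk2, if_neg hk3]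
                  rw [if_neg (by simp [hk1] : ¬ (k == "ID" && Option.isNone i) = true)]
                  rw [if_neg (by simp [hk2] : ¬ (k == "ID_LIKE" && Option.isNone il) = true)]
                  rw [if_neg (by simp [hk3] : ¬ (k == "VERSION_ID" && Option.isNone vi) = true)]
                  exact ih i il vi
          · have hkv : pvKeyVal l = none := by unfold pvKeyVal; rw [if_pos hin, hs]
            show pvBLoop rest (i, il, vi) = _
            rw [ih]; simp only [pvFV_cons_none l rest hkv]
      · rw [if_neg hin]
        have hkv : pvKeyVal l = none := by unfold pvKeyVal; rw [if_neg hin]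
        rw [ih]; simp only [pvFV_cons_none l rest hkv]

theorem pvFirstVal_append (j : String) (xs : List String) (l : String) :
    pvFirstVal j (xs ++ [l]) = (pvFirstVal j xs).or ((pvHit j l).map pvStripQuotes) := by
  induction xs with
  | nil => simp [pvFirstVal, Option.or]; cases (pvHit j l).map pvStripQuotes <;> rfl
  | cons x xs ih =>
    simp only [List.cons_append, pvFirstVal, ih]
    cases (pvHit j x).map pvStripQuotes <;> cases pvFirstVal j xs <;> simp [Option.or]

theorem pvFirst_rev (j : String) (ls : List String) :
    pvFirstVal j ls.reverse = (pvLastVal j ls).map pvStripQuotes := by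
  induction ls with
  | nil => rfl
  | cons l rest ih =>
    rw [List.reverse_cons, pvFirstVal_append, ih, pvLastVal]
    cases pvLastVal j rest <;> cases pvHit j l <;> simp [Option.or]

theorem parse_os_release_spec : Claim_equal_parse_os_release := by
  unfold Claim_equal_parse_os_release Spec_parse_os_release
  intro ls _
  simp only [parse_os_release, parse_os_release_alt, pvBLoop_eq, Option.none_or,
    pvFirst_rev, pvA_lookup]
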